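-- pv_equiv track=rewrite | github.com/kjmillerCURIS/imgeneval | ontology_match_generator.py | generate_matches
-- ===== SOURCE A (Python) =====
-- from itertools import product, permutations
--
-- def generate_matches(N, K):
--     if K > N:
--         trans_matches = generate_matches(K, N)
--         matches = []
--         for tm in trans_matches:
--             match = [-1] * N
--             for k, n in enumerate(tm):
--                 if n >= 0:
--                     assert(match[n] == -1)
--                     match[n] = k
--
--             matches.append(match)
--
--         return matches
--
--     my_perms = permutations(range(N), r=K)
--     matches = []
--     for p in my_perms:
--         match = [-1] * N
--         for k, pp in enumerate(p):
--             match[pp] = k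
--
--         matches.append(match)
--
--     return matches
-- ===== SOURCE B (Python) =====
-- from itertools import permutations
--
-- def generate_matches(N, K):
--     if K > N:
--         # the inverse-then-transpose recursion collapses to the permutations themselves
--         return [list(p) for p in permutations(range(K), r=N)]
--     return [[p.index(n) if n in p else -1 for n in range(N)]
--             for p in permutations(range(N), r=K)]
-- ===== Notes on version B (the rewrite author's own statement) =====
-- stated objective: simpler
-- what changed: The K>N branch's recursion plus inverse/transpose loops collapse to directly listing permutations(range(K), r=N), and the K<=N inner mutation loop becomes an index-lookup comprehension; Pre_ excludes negative N or K, on which A's permutations call raises ValueError (r must be non-negative), as does B's.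
import Mathlib
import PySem

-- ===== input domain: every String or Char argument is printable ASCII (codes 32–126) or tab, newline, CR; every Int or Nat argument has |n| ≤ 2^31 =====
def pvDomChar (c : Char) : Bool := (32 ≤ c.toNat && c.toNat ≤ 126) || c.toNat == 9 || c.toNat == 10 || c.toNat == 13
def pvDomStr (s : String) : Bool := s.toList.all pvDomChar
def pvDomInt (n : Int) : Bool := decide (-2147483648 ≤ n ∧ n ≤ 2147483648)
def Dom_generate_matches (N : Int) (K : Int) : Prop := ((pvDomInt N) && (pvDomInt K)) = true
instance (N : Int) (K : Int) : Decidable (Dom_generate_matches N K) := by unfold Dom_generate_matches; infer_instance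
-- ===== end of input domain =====

-- B simplifies A: the K>N recursion with its inverse/transpose loops collapses to directly
-- listing permutations(range(K), r=N), and the K<=N inner mutation loop becomes an
-- index-lookup comprehension. Same outputs in the same order.

-- shared helper: Python's range(n) as a list of ints (both sources call range)
def pyIntRange (n : Nat) : List Int := (List.range n).map Int.ofNat

-- ===== PORT A =====
-- literal port of A; the always-true `assert(match[n] == -1)` has no effect and is dropped
def generate_matches (N : Int) (K : Int) : List (List Int) :=
  if h : K > N then
    -- trans_matches = generate_matches(K, N); for tm: match=[-1]*N; for k,n in enumerate(tm): if n>=0: match[n]=k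
    (generate_matches K N).map (fun tm =>
      (PySem.List.enumerate tm).foldl
        (fun m kn => if 0 ≤ kn.2 then m.set kn.2.toNat kn.1 else m)
        (List.replicate N.toNat (-1)))
  else
    -- for p in permutations(range(N), r=K): match=[-1]*N; for k,pp in enumerate(p): match[pp]=k
    (PySem.List.permutations (pyIntRange N.toNat) K.toNat).map (fun p =>
      (PySem.List.enumerate p).foldl
        (fun m kpp => m.set kpp.2.toNat kpp.1)
        (List.replicate N.toNat (-1)))
termination_by (if K > N then 1 else 0)
decreasing_by simp only [if_pos h]; split <;> omega

-- ===== PORT B =====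
def generate_matches_alt (N : Int) (K : Int) : List (List Int) :=
  if K > N then
    -- [list(p) for p in permutations(range(K), r=N)]
    PySem.List.permutations (pyIntRange K.toNat) N.toNat
  else
    -- [[p.index(n) if n in p else -1 for n in range(N)] for p in permutations(range(N), r=K)]
    (PySem.List.permutations (pyIntRange N.toNat) K.toNat).map (fun p =>
      (pyIntRange N.toNat).map (fun n =>
        if n ∈ p then
          match PySem.List.index? p n with
          | some i => (i : Int)
          | none => -1   -- unreachable: guarded by `n ∈ p` (Python would raise ValueError here)
        else -1))

-- ===== PRECONDITION & SPEC =====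
-- Pre_ excludes negative N or K, on which A's permutations(..., r=<0) raises ValueError (B raises there too).
def Pre_generate_matches (N : Int) (K : Int) : Prop := 0 ≤ N ∧ 0 ≤ K
instance (N : Int) (K : Int) : Decidable (Pre_generate_matches N K) := by unfold Pre_generate_matches; infer_instance
def pvWitness_generate_matches : Int × Int := (3, 2)
def Spec_generate_matches (N : Int) (K : Int) (out : List (List Int)) : Prop := out = generate_matches_alt N K
instance (N : Int) (K : Int) (out : List (List Int)) : Decidable (Spec_generate_matches N K out) := by unfold Spec_generate_matches; infer_instance

-- ===== CLAIM (what is proved, stated in full; the proofs are below) =====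
def Claim_equal_generate_matches : Prop := ∀ (N : Int) (K : Int), Dom_generate_matches N K → Pre_generate_matches N K → Spec_generate_matches N K (generate_matches N K)

-- ===== LEMMAS AND PROOFS =====

-- the canonical "inverse array" both inner loops compute
def invList (p : List Int) (n : Nat) : List Int :=
  (List.range n).map (fun (j : Nat) =>
    match PySem.List.index? p (Int.ofNat j) with
    | some i => (i : Int)
    | none => -1)

theorem mem_pyIntRange {x : Int} {n : Nat} : x ∈ pyIntRange n ↔ 0 ≤ x ∧ x.toNat < n := by
  simp only [pyIntRange, List.mem_map, List.mem_range, Int.ofNat_eq_natCast]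
  constructor
  · rintro ⟨m, hm, rfl⟩; omega
  · rintro ⟨h0, hn⟩; exact ⟨x.toNat, hn, by omega⟩

theorem nodup_pyIntRange (n : Nat) : (pyIntRange n).Nodup :=
  (List.nodup_range).map (fun a b h => Int.ofNat.inj h)

theorem perms_zero {α : Type} (xs : List α) : PySem.List.permutations xs 0 = [[]] := by
  rw [PySem.List.permutations]

theorem perms_succ {α : Type} (xs : List α) (r : Nat) :
    PySem.List.permutations xs (r+1) =
      (List.range xs.length).flatMap (fun i =>
        match xs[i]? with
        | none => []
        | some x => (PySem.List.permutations (xs.eraseIdx i) r).map (x :: ·)) := by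
  rw [PySem.List.permutations]; rfl

theorem perm_mem {α : Type} (r : Nat) (xs p : List α) (hp : p ∈ PySem.List.permutations xs r) :
    p.length = r ∧ (∀ x ∈ p, x ∈ xs) ∧ (xs.Nodup → p.Nodup) := by
  induction r generalizing xs p with
  | zero => rw [perms_zero] at hp; simp at hp; simp [hp]
  | succ r ih =>
      rw [perms_succ] at hp
      simp only [List.mem_flatMap, List.mem_range] at hp
      obtain ⟨i, hi, hmem⟩ := hp
      rw [List.getElem?_eq_getElem hi] at hmem
      simp only [List.mem_map] at hmem
      obtain ⟨q, hq, rfl⟩ := hmem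
      obtain ⟨hlen, hsub, hnd⟩ := ih (xs.eraseIdx i) q hq
      refine ⟨by simp [hlen], ?_, ?_⟩
      · intro x hx
        rcases List.mem_cons.1 hx with rfl | hx
        · exact List.getElem_mem hi
        · exact List.mem_of_mem_eraseIdx (hsub x hx)
      · intro hxs
        refine List.nodup_cons.2 ⟨?_, hnd (hxs.eraseIdx i)⟩
        intro hmem
        obtain ⟨i', hi', hne, heq⟩ := List.mem_eraseIdx_iff_getElem.1 (hsub _ hmem)
        exact hne ((List.Nodup.getElem_inj_iff hxs).1 heq)

theorem foldSet_length (l : List (Int × Int)) (m : List Int) :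
    (l.foldl (fun m kpp => m.set kpp.2.toNat kpp.1) m).length = m.length := by
  induction l generalizing m with
  | nil => rfl
  | cons x l ih => simp [List.foldl_cons, ih]

theorem foldSetG_length (l : List (Int × Int)) (m : List Int) :
    (l.foldl (fun m kn => if 0 ≤ kn.2 then m.set kn.2.toNat kn.1 else m) m).length = m.length := by
  induction l generalizing m with
  | nil => rfl
  | cons x l ih => simp only [List.foldl_cons]; split <;> simp [ih]

-- value of A's unguarded scatter loop at index j
theorem foldSetEnum (p : List Int) (s : Int) (m : List Int)
    (hnd : p.Nodup) (hb : ∀ x ∈ p, 0 ≤ x ∧ x.toNat < m.length) (j : Nat) :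
    ((PySem.List.enumerate p s).foldl (fun m kpp => m.set kpp.2.toNat kpp.1) m)[j]? =
      (match PySem.List.index? p (j : Int) with
       | some i => some (s + i)
       | none => m[j]?) := by
  induction p generalizing s m with
  | nil =>
      simp [PySem.List.enumerate_nil, PySem.List.index?_eq_idxOf?, List.idxOf?_nil]
  | cons x p ih =>
      rw [PySem.List.enumerate_cons, List.foldl_cons]
      obtain ⟨hx0, hxlt⟩ := hb x List.mem_cons_self
      have hnd' := List.nodup_cons.1 hnd
      by_cases hxj : x = (j : Int)
      · have hxt : x.toNat = j := by omega
        rw [ih (s+1) _ hnd'.2 (by intro y hy; simpa using hb y (List.mem_cons_of_mem _ hy)),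
            ← hxj, PySem.List.index?_cons_self,
            (PySem.List.index?_eq_none_iff p x).2 hnd'.1]
        have hjm : j < m.length := by omega
        simp [hxt, hjm]
      · rw [ih (s+1) _ hnd'.2 (by intro y hy; simpa using hb y (List.mem_cons_of_mem _ hy)),
            PySem.List.index?_cons_of_ne _ hxj]
        have hxt : x.toNat ≠ j := by omega
        cases hip : PySem.List.index? p (j : Int) with
        | none => simp [hxt]
        | some i => simp only [Option.map_some]; congr 1; push_cast; ring

-- value of A's guarded scatter loop at index j
theorem foldSetEnumG (p : List Int) (s : Int) (m : List Int)
    (hpw : p.Pairwise (fun a b => 0 ≤ a → a ≠ b))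
    (hb : ∀ x ∈ p, 0 ≤ x → x.toNat < m.length) (j : Nat) :
    ((PySem.List.enumerate p s).foldl (fun m kn => if 0 ≤ kn.2 then m.set kn.2.toNat kn.1 else m) m)[j]? =
      (match PySem.List.index? p (j : Int) with
       | some i => some (s + i)
       | none => m[j]?) := by
  induction p generalizing s m with
  | nil =>
      simp [PySem.List.enumerate_nil, PySem.List.index?_eq_idxOf?, List.idxOf?_nil]
  | cons x p ih =>
      rw [PySem.List.enumerate_cons, List.foldl_cons]
      simp only []
      obtain ⟨hhd, htl⟩ := List.pairwise_cons.1 hpw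
      by_cases hx0 : (0:Int) ≤ x
      · rw [if_pos hx0]
        have hxlt := hb x List.mem_cons_self hx0
        by_cases hxj : x = (j : Int)
        · have hxt : x.toNat = j := by omega
          have hnp : PySem.List.index? p x = none := by
            rw [PySem.List.index?_eq_none_iff]
            intro hmem
            exact hhd _ hmem hx0 rfl
          rw [ih (s+1) _ htl (by intro y hy h0; simpa using hb y (List.mem_cons_of_mem _ hy) h0),
              ← hxj, PySem.List.index?_cons_self, hnp]
          have hjm : j < m.length := by omega
          simp [hxt, hjm]
        · rw [ih (s+1) _ htl (by intro y hy h0; simpa using hb y (List.mem_cons_of_mem _ hy) h0),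
              PySem.List.index?_cons_of_ne _ hxj]
          have hxt : x.toNat ≠ j := by omega
          cases hip : PySem.List.index? p (j : Int) with
          | none => simp [hxt]
          | some i => simp only [Option.map_some]; congr 1; push_cast; ring
      · rw [if_neg hx0]
        have hxj : x ≠ (j : Int) := by omega
        rw [ih (s+1) m htl (by intro y hy h0; exact hb y (List.mem_cons_of_mem _ hy) h0),
            PySem.List.index?_cons_of_ne _ hxj]
        cases hip : PySem.List.index? p (j : Int) with
        | none => simp
        | some i => simp only [Option.map_some]; congr 1; push_cast; ring

-- Nodup gives first occurrence: index? at p[i] is exactly i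
theorem index?_getElem_of_nodup (p : List Int) (hnd : p.Nodup) (i : Nat) (hi : i < p.length) :
    PySem.List.index? p p[i] = some i := by
  rw [PySem.List.index?_eq_idxOf?, List.idxOf?_eq_some_iff]
  exact ⟨hi, rfl, fun j hj h => by
    have := (List.Nodup.getElem_inj_iff hnd).1 h; omega⟩

-- A's inner loop equals the canonical inverse array
theorem innerA_eq_invList (p : List Int) (n : Nat) (hnd : p.Nodup)
    (hb : ∀ x ∈ p, 0 ≤ x ∧ x.toNat < n) :
    (PySem.List.enumerate p).foldl (fun m kpp => m.set kpp.2.toNat kpp.1)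
      (List.replicate n (-1)) = invList p n := by
  apply List.ext_getElem?
  intro j
  by_cases hj : j < n
  · rw [foldSetEnum p 0 _ hnd (by simpa using hb) j]
    have hr : (List.range n)[j]? = some j := by simp [hj]
    have h2 : (invList p n)[j]? = some (match PySem.List.index? p (j : Int) with
        | some i => (i : Int) | none => -1) := by
      unfold invList
      rw [List.getElem?_map, hr, Option.map_some, Int.ofNat_eq_natCast]
    rw [h2]
    cases hip : PySem.List.index? p (j : Int) with
    | none => simp [hj]
    | some i => simp
  · have h1 : ((PySem.List.enumerate p).foldl (fun m kpp => m.set kpp.2.toNat kpp.1)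
        (List.replicate n (-1))).length = n := by
      rw [foldSet_length]; simp
    rw [List.getElem?_eq_none (by omega), List.getElem?_eq_none (by simp [invList]; omega)]

-- B's inner comprehension equals the canonical inverse array
theorem innerB_eq_invList (p : List Int) (n : Nat) :
    (pyIntRange n).map (fun v =>
      if v ∈ p then
        match PySem.List.index? p v with
        | some i => (i : Int)
        | none => -1
      else -1) = invList p n := by
  simp only [pyIntRange, invList, List.map_map]
  refine List.map_congr_left (fun j _ => ?_)
  simp only [Function.comp, Int.ofNat_eq_natCast]
  by_cases hm : (j : Int) ∈ p
  · rw [if_pos hm]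
  · rw [if_neg hm, (PySem.List.index?_eq_none_iff p _).2 hm]

-- transposing the inverse array recovers p
theorem transpose_invList (p : List Int) (n k : Nat) (hnd : p.Nodup) (hlen : p.length = n)
    (hb : ∀ x ∈ p, 0 ≤ x ∧ x.toNat < k) :
    (PySem.List.enumerate (invList p k)).foldl
      (fun m kn => if 0 ≤ kn.2 then m.set kn.2.toNat kn.1 else m)
      (List.replicate n (-1)) = p := by
  have hg : ∀ j : Nat, j < k → (invList p k)[j]? = some
      (match List.idxOf? (j : Int) p with
       | some i => (i : Int) | none => -1) := by
    intro j hj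
    simp [invList, hj]
  have hpw : (invList p k).Pairwise (fun a b => 0 ≤ a → a ≠ b) := by
    simp only [invList]
    rw [List.pairwise_map]
    refine List.Pairwise.imp_of_mem ?_ (List.pairwise_lt_range)
    intro j1 j2 h1 h2 hlt h0 heq
    simp only [List.mem_range] at h1 h2
    simp only [PySem.List.index?_eq_idxOf?, Int.ofNat_eq_natCast] at h0 heq
    cases hi1 : List.idxOf? ((j1 : Nat) : Int) p with
    | none => rw [hi1] at h0; simp at h0
    | some i1 =>
        cases hi2 : List.idxOf? ((j2 : Nat) : Int) p with
        | none => rw [hi1, hi2] at heq; simp at heq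
        | some i2 =>
            rw [hi1, hi2] at heq
            simp only [] at heq
            have hii : i1 = i2 := by exact_mod_cast heq
            subst hii
            rw [List.idxOf?_eq_some_iff] at hi1 hi2
            obtain ⟨hl1, he1, -⟩ := hi1
            obtain ⟨hl2, he2, -⟩ := hi2
            rw [he1] at he2
            omega
  have hbt : ∀ x ∈ invList p k, 0 ≤ x → x.toNat < n := by
    intro x hx h0
    simp only [invList, List.mem_map, List.mem_range] at hx
    obtain ⟨j, hj, rfl⟩ := hx
    simp only [PySem.List.index?_eq_idxOf?, Int.ofNat_eq_natCast] at h0 ⊢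
    cases hi : List.idxOf? ((j : Nat) : Int) p with
    | none => rw [hi] at h0; simp at h0
    | some i =>
        obtain ⟨hl, -, -⟩ := List.idxOf?_eq_some_iff.1 hi
        simp; omega
  apply List.ext_getElem?
  intro j
  by_cases hj : j < n
  · rw [foldSetEnumG _ 0 _ hpw (by simpa using hbt) j]
    have hjp : j < p.length := by omega
    obtain ⟨hpj0, hpjk⟩ := hb p[j] (List.getElem_mem hjp)
    have hidx : PySem.List.index? (invList p k) (j : Int) = some p[j].toNat := by
      rw [PySem.List.index?_eq_idxOf?, List.idxOf?_eq_some_iff]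
      have hlen2 : (invList p k).length = k := by simp [invList]
      refine ⟨by omega, ?_, ?_⟩
      · have := hg p[j].toNat hpjk
        have hcast : ((p[j].toNat : Nat) : Int) = p[j] := by omega
        rw [List.getElem?_eq_getElem (by omega)] at this
        have hfirst : List.idxOf? ((p[j].toNat : Nat) : Int) p = some j := by
          rw [hcast, ← PySem.List.index?_eq_idxOf?]
          exact index?_getElem_of_nodup p hnd j hjp
        rw [hfirst] at this
        exact Option.some.inj this
      · intro j'' hj'' heq
        have hj''k : j'' < k := by omega
        have := hg j'' hj''k
        rw [List.getElem?_eq_getElem (by omega)] at this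
        have heq' := Option.some.inj this
        rw [heq'] at heq
        cases hi : List.idxOf? ((j'' : Nat) : Int) p with
        | none => rw [hi] at heq; simp at heq
        | some i =>
            rw [hi] at heq
            simp only [] at heq
            have hij : i = j := by exact_mod_cast heq
            subst hij
            obtain ⟨hlp, he, -⟩ := List.idxOf?_eq_some_iff.1 hi
            have he2 : p[i]'hjp = (j'' : Int) := he
            omega
    rw [hidx]
    rw [List.getElem?_eq_getElem hjp]
    simp; omega
  · have h1 : ((PySem.List.enumerate (invList p k)).foldl
        (fun m kn => if 0 ≤ kn.2 then m.set kn.2.toNat kn.1 else m)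
        (List.replicate n (-1))).length = n := by
      rw [foldSetG_length]; simp
    rw [List.getElem?_eq_none (by omega), List.getElem?_eq_none (by omega)]

theorem generate_matches_le (N K : Int) (h : ¬ K > N) :
    generate_matches N K =
      (PySem.List.permutations (pyIntRange N.toNat) K.toNat).map (fun p =>
        (PySem.List.enumerate p).foldl
          (fun m kpp => m.set kpp.2.toNat kpp.1)
          (List.replicate N.toNat (-1))) := by
  rw [generate_matches]; simp [h]

theorem generate_matches_gt (N K : Int) (h : K > N) :
    generate_matches N K =
      (generate_matches K N).map (fun tm =>
        (PySem.List.enumerate tm).foldl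
          (fun m kn => if 0 ≤ kn.2 then m.set kn.2.toNat kn.1 else m)
          (List.replicate N.toNat (-1))) := by
  rw [generate_matches]; simp [h]

theorem perm_props (n r : Nat) (p : List Int)
    (hp : p ∈ PySem.List.permutations (pyIntRange n) r) :
    p.length = r ∧ p.Nodup ∧ ∀ x ∈ p, 0 ≤ x ∧ x.toNat < n := by
  obtain ⟨hlen, hsub, hnd⟩ := perm_mem r _ p hp
  exact ⟨hlen, hnd (nodup_pyIntRange n), fun x hx => mem_pyIntRange.1 (hsub x hx)⟩

-- ===== VERDICT (by name: the statement is the Claim_ definition above) =====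
theorem generate_matches_spec : Claim_equal_generate_matches := by
  intro N K _ hpre
  obtain ⟨hN, hK⟩ := hpre
  unfold Spec_generate_matches generate_matches_alt
  by_cases h : K > N
  · rw [if_pos h, generate_matches_gt N K h, generate_matches_le K N (by omega)]
    rw [List.map_map]
    conv_rhs => rw [← List.map_id (PySem.List.permutations (pyIntRange K.toNat) N.toNat)]
    apply List.map_congr_left
    intro p hp
    obtain ⟨hlen, hnd, hb⟩ := perm_props K.toNat N.toNat p hp
    simp only [Function.comp, id]
    rw [innerA_eq_invList p K.toNat hnd hb]
    exact transpose_invList p N.toNat K.toNat hnd (by omega) hb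
  · rw [if_neg h, generate_matches_le N K h]
    apply List.map_congr_left
    intro p hp
    obtain ⟨hlen, hnd, hb⟩ := perm_props N.toNat K.toNat p hp
    rw [innerA_eq_invList p N.toNat hnd hb, innerB_eq_invList]
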